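-- pv_equiv track=rewrite | github.com/nerkulec/AI | lista1/obrazki.py | opt_dist
-- ===== SOURCE A (Python) =====
-- def opt_dist(colors, dist):
--     count = dist + colors.count(1) - 2*(colors[:dist].count(1))
--     min_count = count
--     for i in range(1, len(colors)-dist+1):
--         count += 2*colors[i-1] - 2*colors[i+dist-1]
--         if count < min_count:
--             min_count = count
--     return min_count
-- ===== SOURCE B (Python) =====
-- def opt_dist(colors, dist):
--     # Value of the first window, then each later window's value relative to it:
--     # shifting the window changes the value by twice the difference of window sums.
--     first = dist + colors.count(1) - 2 * colors[:dist].count(1)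
--     win0 = sum(colors[:dist])
--     best = first
--     for i in range(1, len(colors) - dist + 1):
--         best = min(best, first + 2 * (win0 - sum(colors[i:i + dist])))
--     return best
-- ===== Notes on version B (the rewrite author's own statement) =====
-- stated objective: alternative
-- what changed: A maintains an incremental sliding-window accumulator updated at both boundaries; B computes the first window's value and each later window's value from scratch relative to it (twice the difference of window sums), keeping only the running minimum. Pre_ excludes negative dist, on which A raises IndexError.
-- outside the precondition, e.g. on opt_dist([1, 0, 1], -1): A raises IndexError, B returns -1
import Mathlib
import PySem

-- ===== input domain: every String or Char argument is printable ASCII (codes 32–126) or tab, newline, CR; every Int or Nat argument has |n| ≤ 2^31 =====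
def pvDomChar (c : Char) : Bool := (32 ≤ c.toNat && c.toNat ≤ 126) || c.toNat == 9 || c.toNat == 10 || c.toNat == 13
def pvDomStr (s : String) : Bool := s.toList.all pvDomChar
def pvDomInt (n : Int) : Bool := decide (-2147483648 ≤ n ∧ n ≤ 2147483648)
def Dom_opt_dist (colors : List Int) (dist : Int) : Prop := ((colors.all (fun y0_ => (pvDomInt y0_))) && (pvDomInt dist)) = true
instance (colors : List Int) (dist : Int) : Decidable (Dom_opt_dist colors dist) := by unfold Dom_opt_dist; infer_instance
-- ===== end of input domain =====

-- B replaces A's incremental sliding-window accumulator by per-window recomputation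
-- relative to the first window; objective: alternative.

-- ===== PORT A =====
-- A indexes colors[i-1] and colors[i+dist-1]; under Pre_ (0 ≤ dist) both are in range,
-- so the pyGetD default 0 is never read.
def opt_dist (colors : List Int) (dist : Int) : Int :=
  let count0 : Int := dist + (PySem.List.count colors 1 : Int)
      - 2 * (PySem.List.count (PySem.List.slice colors none (some dist)) 1 : Int)
  (((PySem.List.pyRange 1 ((colors.length : Int) - dist + 1) 1).foldl
      (fun (s : Int × Int) i =>
        let c := s.1 + 2 * PySem.List.pyGetD colors (i - 1) 0
                     - 2 * PySem.List.pyGetD colors (i + dist - 1) 0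
        (c, if c < s.2 then c else s.2))
      (count0, count0)) : Int × Int).2

-- ===== PORT B =====
def opt_dist_alt (colors : List Int) (dist : Int) : Int :=
  let first : Int := dist + (PySem.List.count colors 1 : Int)
      - 2 * (PySem.List.count (PySem.List.slice colors none (some dist)) 1 : Int)
  let win0 : Int := (PySem.List.slice colors none (some dist)).sum
  (PySem.List.pyRange 1 ((colors.length : Int) - dist + 1) 1).foldl
    (fun best i =>
      min best (first + 2 * (win0 - (PySem.List.slice colors (some i) (some (i + dist))).sum)))
    first

-- ===== PRECONDITION & SPEC =====
-- Pre_ excludes exactly dist < 0, where Python A raises IndexError (colors[i-1] runs past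
-- the end of the list for every negative dist).
def Pre_opt_dist (colors : List Int) (dist : Int) : Prop := 0 ≤ dist
instance (colors : List Int) (dist : Int) : Decidable (Pre_opt_dist colors dist) := by unfold Pre_opt_dist; infer_instance
def pvWitness_opt_dist : List Int × Int := ([1, 0, 1, 1, 0], 2)
def Spec_opt_dist (colors : List Int) (dist : Int) (out : Int) : Prop := out = opt_dist_alt colors dist
instance (colors : List Int) (dist : Int) (out : Int) : Decidable (Spec_opt_dist colors dist out) := by unfold Spec_opt_dist; infer_instance

-- ===== CLAIM (what is proved, stated in full; the proofs are below) =====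
def Claim_equal_opt_dist : Prop := ∀ (colors : List Int) (dist : Int), Dom_opt_dist colors dist → Pre_opt_dist colors dist → Spec_opt_dist colors dist (opt_dist colors dist)

-- ===== LEMMAS AND PROOFS =====

-- Shifting a window of length D one step right trades xs[a] for xs[a+D].
lemma window_shift (xs : List Int) (a D : Nat) (h : a + D < xs.length) :
    ((xs.drop (a + 1)).take D).sum = ((xs.drop a).take D).sum - xs[a] + xs[a + D] := by
  have e1 : (xs.drop a).take (D + 1) = xs[a] :: (xs.drop (a + 1)).take D := by
    rw [List.drop_eq_getElem_cons (by omega)]; rfl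
  have e2 : (xs.drop a).take (D + 1) = (xs.drop a).take D ++ [xs[a + D]] := by
    rw [List.take_add_one, List.getElem?_drop,
        List.getElem?_eq_getElem (by omega : a + D < xs.length)]
    rfl
  have := congrArg List.sum (e1.symm.trans e2)
  simp at this
  linarith

-- Loop invariant: A's running accumulator equals B's per-window recomputed value
-- (first + 2*(win0 - current window sum)).
lemma loop_eq (colors : List Int) (dist first win0 : Int) (hd : 0 ≤ dist) :
    ∀ (k : Nat) (lo mn c0 : Int), 1 ≤ lo →
    ((colors.length : Int) - dist + 1 - lo).toNat = k →
    c0 = first + 2 * (win0 - (PySem.List.slice colors (some (lo - 1)) (some (lo - 1 + dist))).sum) →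
    (((PySem.List.pyRange lo ((colors.length : Int) - dist + 1) 1).foldl
        (fun (s : Int × Int) i =>
          let c := s.1 + 2 * PySem.List.pyGetD colors (i - 1) 0
                       - 2 * PySem.List.pyGetD colors (i + dist - 1) 0
          (c, if c < s.2 then c else s.2))
        (c0, mn)) : Int × Int).2
      = (PySem.List.pyRange lo ((colors.length : Int) - dist + 1) 1).foldl
          (fun best i =>
            min best (first + 2 * (win0 - (PySem.List.slice colors (some i) (some (i + dist))).sum)))
          mn := by
  intro k
  induction k with
  | zero =>
    intro lo mn c0 hlo hk hc0
    rw [PySem.List.pyRange_one_eq_nil (by omega)]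
    rfl
  | succ k ih =>
    intro lo mn c0 hlo hk hc0
    have hlt : lo < (colors.length : Int) - dist + 1 := by omega
    rw [PySem.List.pyRange_one_cons hlt]
    set n := colors.length with hn
    have hbound : (lo - 1).toNat + dist.toNat < n := by omega
    have ha : PySem.List.pyGetD colors (lo - 1) 0 = colors[(lo - 1).toNat] :=
      PySem.List.pyGetD_eq_getElem colors (i := lo - 1) 0 (by omega) (by omega)
    have hb : PySem.List.pyGetD colors (lo + dist - 1) 0
        = colors[(lo - 1).toNat + dist.toNat] := by
      have := PySem.List.pyGetD_eq_getElem colors (i := lo + dist - 1) 0 (by omega) (by omega)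
      rw [this]
      congr 1
      omega
    have hsl0 : PySem.List.slice colors (some (lo - 1)) (some (lo - 1 + dist))
        = (colors.drop (lo - 1).toNat).take dist.toNat := by
      rw [PySem.List.slice_toNat colors (a := lo - 1) (b := lo - 1 + dist) (by omega) (by omega)]
      congr 1
      omega
    have hsl1 : PySem.List.slice colors (some lo) (some (lo + dist))
        = (colors.drop ((lo - 1).toNat + 1)).take dist.toNat := by
      rw [PySem.List.slice_toNat colors (a := lo) (b := lo + dist) (by omega) (by omega)]
      congr 2 <;> omega
    have hstep : c0 + 2 * PySem.List.pyGetD colors (lo - 1) 0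
          - 2 * PySem.List.pyGetD colors (lo + dist - 1) 0
        = first + 2 * (win0 - (PySem.List.slice colors (some lo) (some (lo + dist))).sum) := by
      rw [ha, hb, hsl1, window_shift colors (lo - 1).toNat dist.toNat hbound, hc0, hsl0]
      ring
    simp only [List.foldl_cons]
    have hc0' : first + 2 * (win0 - (PySem.List.slice colors (some lo) (some (lo + dist))).sum)
        = first + 2 * (win0 - (PySem.List.slice colors (some (lo + 1 - 1)) (some (lo + 1 - 1 + dist))).sum) := by
      norm_num
    have hmin : ∀ a b : Int, (if b < a then b else a) = min a b := by
      intro a b; rcases lt_or_ge b a with h | h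
      · simp [h, min_eq_right (le_of_lt h)]
      · simp [not_lt.mpr h, min_eq_left h]
    rw [hstep, hmin]
    exact ih (lo + 1) _ _ (by omega) (by omega) hc0'

-- ===== VERDICT (by name: the statement is the Claim_ definition above) =====
theorem opt_dist_spec : Claim_equal_opt_dist := by
  intro colors dist _ hpre
  unfold Spec_opt_dist opt_dist opt_dist_alt
  have hd : (0:Int) ≤ dist := hpre
  rw [loop_eq colors dist
      (dist + (PySem.List.count colors 1 : Int)
        - 2 * (PySem.List.count (PySem.List.slice colors none (some dist)) 1 : Int))
      (PySem.List.slice colors none (some dist)).sum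
      hd _ 1 _ _ (by omega) rfl
      (by
        have : PySem.List.slice colors (some ((1:Int) - 1)) (some ((1:Int) - 1 + dist))
            = PySem.List.slice colors none (some dist) := by
          norm_num
        rw [this]
        ring)]
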